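-- pv_equiv track=rewrite | github.com/NeverQuitYourDayDream/cfslns | python/102B.py | solve
-- ===== SOURCE A (Python) =====
-- def solve(n):
--     c = 0
--     while n > 9:
--         n = sum(map(int, str(n)))
--         c += 1
--
--     if n == 0:
--         return 0
--     else:
--         return c
-- ===== SOURCE B (Python) =====
-- def solve(n):
--     if n <= 9:
--         return 0
--     return 1 + solve(sum(map(int, str(n))))
-- ===== Notes on version B (the rewrite author's own statement) =====
-- stated objective: simpler
-- what changed: The while loop threading a counter (plus A's redundant n==0 check) is replaced by the defining recurrence of additive persistence: 0 if n <= 9, else 1 + solve(digit sum).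
import Mathlib
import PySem

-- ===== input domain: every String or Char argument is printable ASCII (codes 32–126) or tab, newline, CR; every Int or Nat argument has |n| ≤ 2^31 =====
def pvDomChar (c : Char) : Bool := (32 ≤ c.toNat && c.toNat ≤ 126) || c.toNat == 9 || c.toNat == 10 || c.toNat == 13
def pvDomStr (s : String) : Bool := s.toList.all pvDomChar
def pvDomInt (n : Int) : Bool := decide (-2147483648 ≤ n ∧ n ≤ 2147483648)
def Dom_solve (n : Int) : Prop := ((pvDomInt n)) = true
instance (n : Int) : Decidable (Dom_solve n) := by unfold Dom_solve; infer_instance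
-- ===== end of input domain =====

-- B is the defining recursion of additive persistence (0 if n ≤ 9, else 1 + recurse on the
-- digit sum) instead of A's while loop threading a counter with a redundant n == 0 check.

-- Shared helper: sum(map(int, str(n))).  int(c) on a single digit char c is c.toNat - 48;
-- exact here because both programs only apply it when n > 9, so str(n) is all digits.
def pyDigitSum (n : Int) : Int :=
  ((PySem.Int.toChars n).map (fun c => ((c.toNat : Int) - 48))).sum

-- ===== PORT A =====
-- the while loop, as fuel recursion over the state (n, c); fuel n.toNat + 1 never runs out
-- on the domain since the digit sum of n > 9 is strictly smaller than n
def solveLoop : Nat → Int → Int → Int × Int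
  | 0, n, c => (n, c)
  | f + 1, n, c => if 9 < n then solveLoop f (pyDigitSum n) (c + 1) else (n, c)

def solve (n : Int) : Int :=
  let p := solveLoop (n.toNat + 1) n 0
  if p.1 = 0 then 0 else p.2

-- ===== PORT B =====
def solveRec : Nat → Int → Int
  | 0, _ => 0
  | f + 1, n => if n ≤ 9 then 0 else 1 + solveRec f (pyDigitSum n)

def solve_alt (n : Int) : Int := solveRec (n.toNat + 1) n

-- ===== PRECONDITION & SPEC =====
def Spec_solve (n : Int) (out : Int) : Prop := out = solve_alt n
instance (n : Int) (out : Int) : Decidable (Spec_solve n out) := by unfold Spec_solve; infer_instance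

-- ===== CLAIM (what is proved, stated in full; the proofs are below) =====
def Claim_equal_solve : Prop := ∀ (n : Int), Dom_solve n → Spec_solve n (solve n)

-- ===== LEMMAS AND PROOFS =====

-- Nat.toDigits via Nat.digits
lemma toDigitsCore_eq_digits (f : Nat) : ∀ n l, 0 < n → n < f →
    Nat.toDigitsCore 10 f n l = ((Nat.digits 10 n).map Nat.digitChar).reverse ++ l := by
  induction f with
  | zero => intro n l h1 h2; omega
  | succ f ih =>
    intro n l h1 h2
    rw [Nat.toDigitsCore]
    by_cases h : n / 10 = 0
    · have h10 : n < 10 := by omega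
      rw [Nat.digits_def' (by norm_num : 1 < 10) h1, h, Nat.digits_zero,
        Nat.mod_eq_of_lt h10]
      simp
    · have hpos : 0 < n / 10 := Nat.pos_of_ne_zero h
      have hlt : n / 10 < f := by
        have := Nat.div_lt_self h1 (by norm_num : 1 < 10); omega
      simp only [h]
      rw [ih (n / 10) _ hpos hlt, Nat.digits_def' (by norm_num : 1 < 10) h1]
      simp

lemma digitChar_toNat {d : Nat} (hd : d < 10) : (Nat.digitChar d).toNat = 48 + d := by
  interval_cases d <;> decide

lemma pyDigitSum_eq_digits (n : Int) (h : 0 < n) :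
    pyDigitSum n = ((Nat.digits 10 n.toNat).sum : Int) := by
  have hn : ¬ n < 0 := by omega
  have hpos : 0 < n.toNat := by omega
  rw [pyDigitSum, PySem.Int.toChars, if_neg hn, Nat.toDigits,
    toDigitsCore_eq_digits _ _ _ hpos (by omega)]
  rw [List.append_nil, List.map_reverse, List.sum_reverse, List.map_map]
  rw [List.map_congr_left (fun d hd => by
    have hlt : d < 10 := Nat.digits_lt_base (by norm_num) hd
    show ((Nat.digitChar d).toNat : Int) - 48 = (d : Int)
    rw [digitChar_toNat hlt]; push_cast; ring)]
  exact (Nat.cast_list_sum _).symm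

lemma digits_sum_pos {m : Nat} (h : 0 < m) : 0 < (Nat.digits 10 m).sum := by
  induction m using Nat.strong_induction_on with
  | _ m ih =>
    rw [Nat.digits_def' (by norm_num : 1 < 10) h]
    by_cases h10 : m / 10 = 0
    · have : m % 10 = m := Nat.mod_eq_of_lt (by omega)
      simp [this]; omega
    · have := ih (m / 10) (Nat.div_lt_self h (by norm_num)) (Nat.pos_of_ne_zero h10)
      simp; omega

lemma pyDigitSum_pos (n : Int) (h : 9 < n) : 0 < pyDigitSum n := by
  rw [pyDigitSum_eq_digits n (by omega)]
  exact_mod_cast digits_sum_pos (by omega)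

lemma solveLoop_fst_pos (f : Nat) : ∀ n c, 0 < n → 0 < (solveLoop f n c).1 := by
  induction f with
  | zero => intro n c h; simpa [solveLoop]
  | succ f ih =>
    intro n c h
    rw [solveLoop]
    by_cases h9 : 9 < n
    · rw [if_pos h9]; exact ih _ _ (pyDigitSum_pos n h9)
    · rw [if_neg h9]; simpa

lemma solveLoop_snd (f : Nat) : ∀ n c, (solveLoop f n c).2 = c + solveRec f n := by
  induction f with
  | zero => intro n c; simp [solveLoop, solveRec]
  | succ f ih =>
    intro n c
    rw [solveLoop, solveRec]
    by_cases h9 : 9 < n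
    · rw [if_pos h9, if_neg (by omega), ih]; ring
    · rw [if_neg h9, if_pos (by omega)]; simp

-- ===== VERDICT (by name: the statement is the Claim_ definition above) =====
theorem solve_spec : Claim_equal_solve := by
  intro n _
  unfold Spec_solve solve solve_alt
  by_cases hpos : 0 < n
  · have h1 := solveLoop_fst_pos (n.toNat + 1) n 0 hpos
    have h2 := solveLoop_snd (n.toNat + 1) n 0
    simp only [if_neg (by omega : ¬ (solveLoop (n.toNat + 1) n 0).1 = 0), h2, zero_add]
  · have hn : n.toNat = 0 := by omega
    rw [hn]
    rw [show solveLoop (0 + 1) n 0 = (n, 0) by rw [solveLoop, if_neg (by omega)]]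
    rw [show solveRec (0 + 1) n = 0 by rw [solveRec, if_pos (by omega)]]
    by_cases h0 : n = 0 <;> simp [h0]
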